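-- pv_equiv track=rewrite | github.com/nicolsss/ioet_scheduling_exercise | src/functions/schedule_functions.py | get_total_overlap_employees
-- ===== SOURCE A (Python) =====
-- def are_times_overlap(time_e1, time_e2):
--     """
--     Check if two employees' time frame match
--     :param time_e1: tuple
--         Time frame of an employee
--     :param time_e2: tuple
--         Time frame of another employee
--     :return: bool
--         True if time frame of the two employee match
--     """
--     start_e1, end_e1 = time_e1
--     start_e2, end_e2 = time_e2
--     return start_e1 <= start_e2 < end_e1 or start_e2 <= start_e1 < end_e2
--
-- def get_total_overlap(schedule_e1, schedule_e2):
--     """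
--     Calculate the total of time frames two employees match
--     :param schedule_e1: dict
--         Schedule of an employee
--     :param schedule_e2:
--         Schedule of another employee
--     :return: int
--         Total value of the matching schedules
--     """
--     total = 0
--     for day in schedule_e1.keys():
--         if day in schedule_e2:
--             time_e1 = schedule_e1[day]
--             time_e2 = schedule_e2[day]
--             if are_times_overlap(time_e1, time_e2):
--                 total += 1
--     return total
--
-- def get_total_overlap_employees(name_e1, schedules):
--     """
--     Get the total of an employee's time frame match with each other employees,
--     if two employees have 0 matches the total is not added to the dictionary
--     :param name_e1: str
--         Name of an employee
--     :param schedules: dict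
--         Schedules of all employees
--     :return: dict
--         Dictionary with the total values of employees' time frame matching
--     """
--     overlap_employees = dict()
--     for name_e2 in schedules.keys():
--         if name_e1 != name_e2:
--             schedule_e1 = schedules[name_e1]
--             schedule_e2 = schedules[name_e2]
--             total_overlap = get_total_overlap(schedule_e1, schedule_e2)
--             if total_overlap != 0:
--                 overlap_employees[name_e1 + '-' + name_e2] = total_overlap
--     return overlap_employees
-- ===== SOURCE B (Python) =====
-- def get_total_overlap_employees(name_e1, schedules):
--     # Hash-join on days: build an inverted index day -> [(employee, time)] in one pass,
--     # then sweep each day bucket once, crediting every colleague that matches name_e1's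
--     # time frame for that day; finally emit totals in schedules key order.
--     by_day = {}
--     for name, schedule in schedules.items():
--         for day, time in schedule.items():
--             by_day.setdefault(day, []).append((name, time))
--     counts = {}
--     for entries in by_day.values():
--         time_e1 = next((t for n, t in entries if n == name_e1), None)
--         if time_e1 is not None:
--             start_e1, end_e1 = time_e1
--             for name, (start_e2, end_e2) in entries:
--                 if name != name_e1 and (start_e1 <= start_e2 < end_e1 or start_e2 <= start_e1 < end_e2):
--                     counts[name] = counts.get(name, 0) + 1
--     return {name_e1 + '-' + name: counts[name]
--             for name in schedules
--             if name != name_e1 and counts.get(name, 0) != 0}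
-- ===== Notes on version B (the rewrite author's own statement) =====
-- stated objective: alternative
-- what changed: B replaces the pairwise day-membership scans by a hash join: it builds an inverted index day -> [(employee, time)] in one pass over all schedules, then sweeps each day bucket once crediting matching colleagues in a counts table, and emits totals in schedules key order; the 'day in schedule_e2' membership test disappears.
-- outside the precondition, e.g. on get_total_overlap_employees('al', {'bo': {'mon': (1, 2)}}): A raises KeyError, B returns {}
import Mathlib
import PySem

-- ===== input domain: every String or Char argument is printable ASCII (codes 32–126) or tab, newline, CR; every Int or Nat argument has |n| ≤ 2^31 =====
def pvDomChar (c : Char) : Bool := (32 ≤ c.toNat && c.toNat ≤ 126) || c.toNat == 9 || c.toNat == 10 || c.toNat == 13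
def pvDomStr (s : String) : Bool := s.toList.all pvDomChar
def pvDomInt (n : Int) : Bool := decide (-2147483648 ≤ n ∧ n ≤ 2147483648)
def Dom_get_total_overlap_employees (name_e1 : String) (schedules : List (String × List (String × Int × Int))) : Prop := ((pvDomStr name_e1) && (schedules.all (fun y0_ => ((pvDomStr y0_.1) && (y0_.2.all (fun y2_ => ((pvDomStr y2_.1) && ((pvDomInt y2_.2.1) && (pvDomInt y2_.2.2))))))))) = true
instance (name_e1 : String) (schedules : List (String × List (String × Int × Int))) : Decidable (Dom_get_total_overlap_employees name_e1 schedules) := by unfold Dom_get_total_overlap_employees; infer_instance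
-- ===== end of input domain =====

-- B replaces the pairwise day-membership scans by a hash join: one pass builds an inverted index
-- day -> [(employee, time)], each day bucket is swept once crediting matching colleagues in a counts
-- table, and totals are emitted in schedules key order (alternative decomposition, same cost).


-- ===== PORT A =====
def pyAreTimesOverlap (time_e1 time_e2 : Int × Int) : Bool :=
  (decide (time_e1.1 ≤ time_e2.1) && decide (time_e2.1 < time_e1.2)) ||
  (decide (time_e2.1 ≤ time_e1.1) && decide (time_e1.1 < time_e2.2))

def pyGetTotalOverlap (schedule_e1 schedule_e2 : PySem.Dict String (Int × Int)) : Int :=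
  schedule_e1.keys.foldl (fun total day =>
    if schedule_e2.contains day then
      if pyAreTimesOverlap (schedule_e1.getD day (0, 0)) (schedule_e2.getD day (0, 0))
      then total + 1 else total
    else total) 0

def get_total_overlap_employees (name_e1 : String) (schedules : List (String × List (String × Int × Int))) : List (String × Int) :=
  let d : PySem.Dict String (List (String × Int × Int)) := PySem.Dict.mk schedules
  (d.keys.foldl (fun acc name_e2 =>
    if name_e1 ≠ name_e2 then
      let total := pyGetTotalOverlap (PySem.Dict.mk (d.getD name_e1 [])) (PySem.Dict.mk (d.getD name_e2 []))
      if total ≠ 0 then acc.insert (name_e1 ++ "-" ++ name_e2) total else acc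
    else acc) PySem.Dict.empty).items

-- ===== PORT B =====
-- Source B: build by_day (setdefault/append = Dict.modify with default [] and append), sweep its values
-- once accumulating counts, then emit in schedules key order.
def get_total_overlap_employees_alt (name_e1 : String) (schedules : List (String × List (String × Int × Int))) : List (String × Int) :=
  let by_day : PySem.Dict String (List (String × Int × Int)) :=
    schedules.foldl (fun idx p =>
      p.2.foldl (fun idx q => idx.modify q.1 [] (· ++ [(p.1, q.2)])) idx) PySem.Dict.empty
  let counts : PySem.Dict String Int :=
    by_day.values.foldl (fun counts entries =>
      match (entries.find? (fun e => e.1 == name_e1)).map (fun e => e.2) with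
      | none => counts
      | some t1 =>
        entries.foldl (fun counts e =>
          if e.1 ≠ name_e1 ∧ ((t1.1 ≤ e.2.1 ∧ e.2.1 < t1.2) ∨ (e.2.1 ≤ t1.1 ∧ t1.1 < e.2.2))
          then counts.insert e.1 (counts.getD e.1 0 + 1) else counts) counts) PySem.Dict.empty
  (schedules.foldl (fun res p =>
    if p.1 ≠ name_e1 ∧ counts.getD p.1 0 ≠ 0
    then res.insert (name_e1 ++ "-" ++ p.1) (counts.getD p.1 0) else res) PySem.Dict.empty).items

-- ===== PRECONDITION & SPEC =====
-- Pre_ excludes (a) inputs where A raises KeyError (nonempty schedules whose keys miss name_e1) and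
-- (b) association lists with duplicate outer or inner keys, which a Python dict argument cannot
-- represent (the list encoding's behaviour there is accidental).
def Pre_get_total_overlap_employees (name_e1 : String) (schedules : List (String × List (String × Int × Int))) : Prop :=
  (schedules = [] ∨ name_e1 ∈ schedules.map Prod.fst) ∧
  (schedules.map Prod.fst).Nodup ∧
  ∀ p ∈ schedules, (p.2.map Prod.fst).Nodup
instance (name_e1 : String) (schedules : List (String × List (String × Int × Int))) : Decidable (Pre_get_total_overlap_employees name_e1 schedules) := by unfold Pre_get_total_overlap_employees; infer_instance

def pvWitness_get_total_overlap_employees : String × (List (String × List (String × Int × Int))) :=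
  ("al", [("al", [("mon", (1, 5)), ("tue", (0, 2))]), ("bo", [("mon", (2, 6))])])

def Spec_get_total_overlap_employees (name_e1 : String) (schedules : List (String × List (String × Int × Int))) (out : List (String × Int)) : Prop := out = get_total_overlap_employees_alt name_e1 schedules
instance (name_e1 : String) (schedules : List (String × List (String × Int × Int))) (out : List (String × Int)) : Decidable (Spec_get_total_overlap_employees name_e1 schedules out) := by unfold Spec_get_total_overlap_employees; infer_instance

-- ===== CLAIM (what is proved, stated in full; the proofs are below) =====
def Claim_equal_get_total_overlap_employees : Prop := ∀ (name_e1 : String) (schedules : List (String × List (String × Int × Int))), Dom_get_total_overlap_employees name_e1 schedules → Pre_get_total_overlap_employees name_e1 schedules → Spec_get_total_overlap_employees name_e1 schedules (get_total_overlap_employees name_e1 schedules)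

-- ===== LEMMAS AND PROOFS =====

-- the per-entry hit condition of B (e is one (employee, time) entry of a day bucket)
abbrev pvHit (n1 : String) (t1 : Int × Int) (e : String × Int × Int) : Prop :=
  e.1 ≠ n1 ∧ ((t1.1 ≤ e.2.1 ∧ e.2.1 < t1.2) ∨ (e.2.1 ≤ t1.1 ∧ t1.1 < e.2.2))

-- flattened (day, (employee, time)) stream of all schedules, and the bucket one day collects
def pvFlat (ss : List (String × List (String × Int × Int))) : List (String × (String × Int × Int)) :=
  ss.flatMap (fun p => p.2.map (fun q => (q.1, (p.1, q.2))))

def pvBucket (dday : String) (ss : List (String × List (String × Int × Int))) : List (String × Int × Int) :=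
  ss.flatMap (fun p => (p.2.filter (fun q => q.1 == dday)).map (fun q => (p.1, q.2)))

-- what one bucket adds to counts[n2]
def pvContrib (n1 n2 : String) (b : List (String × Int × Int)) : Int :=
  match (b.find? (fun e => e.1 == n1)).map (fun e => e.2) with
  | none => 0
  | some t1 => ((((b.filter (fun e => decide (pvHit n1 t1 e))).map Prod.fst).count n2 : Nat) : Int)

-- the per-day indicator in lookup form
def pvG (n1 n2 : String) (sch1 sch2 : List (String × Int × Int)) (d : String) : Bool :=
  match sch1.find? (fun q => q.1 == d), sch2.find? (fun q => q.1 == d) with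
  | some q1, some q2 => decide (pvHit n1 q1.2 (n2, q2.2))
  | _, _ => false

lemma countP_key_unique {α : Type} (l : List (String × α)) (pr : (String × α) → Bool)
    (n2 : String) (v : α) (hnd : (l.map Prod.fst).Nodup) (hm : (n2, v) ∈ l) :
    l.countP (fun q => (q.1 == n2) && pr q) = if pr (n2, v) then 1 else 0 := by
  induction l with
  | nil => cases hm
  | cons h t ih =>
    simp only [List.map_cons, List.nodup_cons] at hnd
    rcases List.mem_cons.mp hm with rfl | hmt
    · rw [List.countP_cons]
      have hz : t.countP (fun q => (q.1 == n2) && pr q) = 0 := by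
        rw [List.countP_eq_zero]
        intro q hq hqp
        simp only [Bool.and_eq_true, beq_iff_eq] at hqp
        have h1 : n2 ∉ t.map Prod.fst := by simpa using hnd.1
        exact h1 (hqp.1 ▸ List.mem_map_of_mem (f := Prod.fst) hq)
      simp [hz]
    · rw [List.countP_cons, ih hnd.2 hmt]
      have hne : h.1 ≠ n2 := by
        intro heq
        exact hnd.1 (by rw [heq]; exact List.mem_map_of_mem (f := Prod.fst) hmt)
      simp [hne]

lemma find?_of_mem_nodup {α : Type} (l : List (String × α)) (k : String) (v : α)
    (hnd : (l.map Prod.fst).Nodup) (hm : (k, v) ∈ l) :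
    l.find? (fun e => e.1 == k) = some (k, v) := by
  induction l with
  | nil => cases hm
  | cons h t ih =>
    simp only [List.map_cons, List.nodup_cons] at hnd
    by_cases hk : h.1 = k
    · rcases List.mem_cons.mp hm with rfl | hmt
      · simp
      · exact absurd (List.mem_map_of_mem (f := Prod.fst) hmt) (hk ▸ hnd.1)
    · have hb : (h.1 == k) = false := beq_eq_false_iff_ne.mpr hk
      have hmt : (k, v) ∈ t := by
        rcases List.mem_cons.mp hm with rfl | hmt
        · exact absurd rfl hk
        · exact hmt
      simp only [List.find?_cons, hb]
      exact ih hnd.2 hmt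

lemma find?_eq_none_of_not_mem {α : Type} (l : List (String × α)) (k : String)
    (h : k ∉ l.map Prod.fst) : l.find? (fun e => e.1 == k) = none := by
  rw [List.find?_eq_none]
  intro e he hbe
  have hmem : e.1 ∈ l.map Prod.fst := List.mem_map_of_mem (f := Prod.fst) he
  rw [beq_iff_eq.mp hbe] at hmem
  exact h hmem

lemma pair_unique {α : Type} (l : List (String × α)) (k : String) (a b : α)
    (hnd : (l.map Prod.fst).Nodup) (h1 : (k, a) ∈ l) (h2 : (k, b) ∈ l) : a = b := by
  have ha := find?_of_mem_nodup l k a hnd h1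
  have hb := find?_of_mem_nodup l k b hnd h2
  have := ha.symm.trans hb
  simpa using this

lemma get?_mk_find {α : Type} (l : List (String × α)) (k : String) :
    (PySem.Dict.mk l).get? k = (l.find? (fun e => e.1 == k)).map (fun e => e.2) := by
  induction l with
  | nil => rfl
  | cons h t ih =>
    rw [List.find?_cons, PySem.Dict.get?_mk_cons]
    by_cases hk : (h.1 == k) = true
    · simp [hk]
    · simp only [Bool.not_eq_true] at hk
      simp [hk, ih]

-- the nested by_day loop is the flat loop over pvFlat
lemma byday_eq_flat_fold (ss : List (String × List (String × Int × Int)))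
    (d0 : PySem.Dict String (List (String × Int × Int))) :
    ss.foldl (fun idx p =>
      p.2.foldl (fun idx q => idx.modify q.1 [] (· ++ [(p.1, q.2)])) idx) d0
    = (pvFlat ss).foldl (fun idx r => idx.modify r.1 [] (· ++ [r.2])) d0 := by
  induction ss generalizing d0 with
  | nil => rfl
  | cons p t ih =>
    rw [List.foldl_cons, ih]
    simp only [pvFlat, List.flatMap_cons, List.foldl_append, List.foldl_map]

lemma bucket_eq_filter_flat (ss : List (String × List (String × Int × Int))) (dday : String) :
    ((pvFlat ss).filter (fun r => r.1 == dday)).map (fun r => r.2) = pvBucket dday ss := by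
  rw [pvFlat, pvBucket, List.filter_flatMap, List.map_flatMap]
  refine List.flatMap_congr ?_
  intro p _
  rw [List.filter_map, List.map_map]
  rfl

lemma mem_bucket (ss : List (String × List (String × Int × Int))) (dday : String)
    (e : String × Int × Int) :
    e ∈ pvBucket dday ss ↔ ∃ p ∈ ss, ∃ q ∈ p.2, q.1 = dday ∧ e = (p.1, q.2) := by
  simp only [pvBucket, List.mem_flatMap, List.mem_map, List.mem_filter, beq_iff_eq]
  constructor
  · rintro ⟨p, hp, q, ⟨hq, hqd⟩, rfl⟩
    exact ⟨p, hp, q, hq, hqd, rfl⟩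
  · rintro ⟨p, hp, q, hq, hqd, rfl⟩
    exact ⟨p, hp, q, ⟨hq, hqd⟩, rfl⟩

lemma filter_len_le_one {α : Type} (l : List (String × α)) (dday : String)
    (hnd : (l.map Prod.fst).Nodup) : (l.filter (fun q => q.1 == dday)).length ≤ 1 := by
  rw [← List.countP_eq_length_filter]
  have : l.countP (fun q => q.1 == dday) = (l.map Prod.fst).count dday := by
    rw [List.count_eq_countP, List.countP_map]
    rfl
  rw [this]
  exact List.nodup_iff_count_le_one.mp hnd dday

lemma bucket_fst_sublist (ss : List (String × List (String × Int × Int))) (dday : String)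
    (hin : ∀ p ∈ ss, (p.2.map Prod.fst).Nodup) :
    ((pvBucket dday ss).map Prod.fst).Sublist (ss.map Prod.fst) := by
  induction ss with
  | nil => simp [pvBucket]
  | cons p t ih =>
    have hrest := ih (fun q hq => hin q (List.mem_cons_of_mem _ hq))
    rw [pvBucket, List.flatMap_cons, List.map_append, List.map_cons]
    have hlen := filter_len_le_one p.2 dday (hin p (List.mem_cons_self ..))
    cases hf : p.2.filter (fun q => q.1 == dday) with
    | nil => simpa [pvBucket, hf] using hrest.cons p.1
    | cons a l2 =>
      have hl2 : l2 = [] := by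
        rw [hf] at hlen
        simp only [List.length_cons] at hlen
        exact List.length_eq_zero_iff.mp (by omega)
      subst hl2
      simpa [pvBucket, hf] using hrest.cons₂ p.1

lemma bucket_fst_nodup (ss : List (String × List (String × Int × Int))) (dday : String)
    (hnd : (ss.map Prod.fst).Nodup) (hin : ∀ p ∈ ss, (p.2.map Prod.fst).Nodup) :
    ((pvBucket dday ss).map Prod.fst).Nodup :=
  (bucket_fst_sublist ss dday hin).nodup hnd

lemma counts_getD (n1 n2 : String) (bs : List (List (String × Int × Int))) (c : PySem.Dict String Int) :
    (bs.foldl (fun counts entries =>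
      match (entries.find? (fun e => e.1 == n1)).map (fun e => e.2) with
      | none => counts
      | some t1 =>
        entries.foldl (fun counts e =>
          if e.1 ≠ n1 ∧ ((t1.1 ≤ e.2.1 ∧ e.2.1 < t1.2) ∨ (e.2.1 ≤ t1.1 ∧ t1.1 < e.2.2))
          then counts.insert e.1 (counts.getD e.1 0 + 1) else counts) counts) c).getD n2 0
    = c.getD n2 0 + (bs.map (pvContrib n1 n2)).sum := by
  induction bs generalizing c with
  | nil => simp
  | cons b t ih =>
    rw [List.foldl_cons, ih]
    simp only [List.map_cons, List.sum_cons]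
    cases hf : (b.find? (fun e => e.1 == n1)).map (fun e => e.2) with
    | none =>
      simp only [pvContrib, hf]
      ring
    | some t1 =>
      have hstep : (b.foldl (fun counts e =>
          if e.1 ≠ n1 ∧ ((t1.1 ≤ e.2.1 ∧ e.2.1 < t1.2) ∨ (e.2.1 ≤ t1.1 ∧ t1.1 < e.2.2))
          then counts.insert e.1 (counts.getD e.1 0 + 1) else counts) c).getD n2 0
          = c.getD n2 0 + pvContrib n1 n2 b := by
        have hfun : (fun (counts : PySem.Dict String Int) (e : String × Int × Int) =>
            if e.1 ≠ n1 ∧ ((t1.1 ≤ e.2.1 ∧ e.2.1 < t1.2) ∨ (e.2.1 ≤ t1.1 ∧ t1.1 < e.2.2))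
            then counts.insert e.1 (counts.getD e.1 0 + 1) else counts)
            = (fun counts e => if pvHit n1 t1 e then counts.insert e.1 (counts.getD e.1 0 + 1) else counts) := rfl
        rw [hfun, PySem.List.foldl_ite_eq_foldl_filter]
        have hmap : (b.filter (fun e => decide (pvHit n1 t1 e))).foldl
            (fun c e => c.insert e.1 (c.getD e.1 0 + 1)) c
            = ((b.filter (fun e => decide (pvHit n1 t1 e))).map Prod.fst).foldl
              (fun c x => c.insert x (c.getD x 0 + 1)) c := by rw [List.foldl_map]
        rw [hmap, PySem.Dict.getD_foldl_insert_add_one]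
        simp only [pvContrib, hf]
      rw [hstep]; ring

lemma contrib_bucket (ss : List (String × List (String × Int × Int)))
    (n1 : String) (sch1 : List (String × Int × Int)) (n2 : String) (sch2 : List (String × Int × Int))
    (dday : String)
    (hnd : (ss.map Prod.fst).Nodup) (hin : ∀ p ∈ ss, (p.2.map Prod.fst).Nodup)
    (h1 : (n1, sch1) ∈ ss) (h2 : (n2, sch2) ∈ ss) :
    pvContrib n1 n2 (pvBucket dday ss) = if pvG n1 n2 sch1 sch2 dday = true then (1 : Int) else 0 := by
  have hbnd := bucket_fst_nodup ss dday hnd hin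
  cases hf1 : sch1.find? (fun q => q.1 == dday) with
  | none =>
    have hnone : (pvBucket dday ss).find? (fun e => e.1 == n1) = none := by
      apply find?_eq_none_of_not_mem
      intro hmem
      obtain ⟨e, he, hefst⟩ := List.mem_map.mp hmem
      obtain ⟨⟨pn, psch⟩, hp, q, hq, hqd, rfl⟩ := (mem_bucket ss dday e).mp he
      simp only at hefst
      rw [hefst] at hp
      have hps : psch = sch1 := pair_unique ss n1 psch sch1 hnd hp h1
      subst hps
      exact absurd (by simpa using hqd) (List.find?_eq_none.mp hf1 q hq)
    simp [pvContrib, hnone, pvG, hf1]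
  | some q1 =>
    have hq1m := List.mem_of_find?_eq_some hf1
    have hq1d : q1.1 = dday := by simpa using List.find?_some hf1
    have hmemb : (n1, q1.2) ∈ pvBucket dday ss := by
      rw [mem_bucket]
      exact ⟨(n1, sch1), h1, q1, hq1m, hq1d, rfl⟩
    have hfind : (pvBucket dday ss).find? (fun e => e.1 == n1) = some (n1, q1.2) :=
      find?_of_mem_nodup _ n1 q1.2 hbnd hmemb
    cases hf2 : sch2.find? (fun q => q.1 == dday) with
    | none =>
      have hz : (((pvBucket dday ss).filter (fun e => decide (pvHit n1 q1.2 e))).map Prod.fst).count n2 = 0 := by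
        rw [List.count_eq_zero]
        intro hmem
        obtain ⟨e, he, hefst⟩ := List.mem_map.mp hmem
        obtain ⟨⟨pn, psch⟩, hp, q, hq, hqd, rfl⟩ := (mem_bucket ss dday e).mp (List.mem_filter.mp he).1
        simp only at hefst
        rw [hefst] at hp
        have hps : psch = sch2 := pair_unique ss n2 psch sch2 hnd hp h2
        subst hps
        exact absurd (by simpa using hqd) (List.find?_eq_none.mp hf2 q hq)
      have hc : pvContrib n1 n2 (pvBucket dday ss)
          = ((((pvBucket dday ss).filter (fun e => decide (pvHit n1 q1.2 e))).map Prod.fst).count n2 : Int) := by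
        simp only [pvContrib, hfind, Option.map_some]
      rw [hc, hz]
      simp [pvG, hf1, hf2]
    | some q2 =>
      have hq2m := List.mem_of_find?_eq_some hf2
      have hq2d : q2.1 = dday := by simpa using List.find?_some hf2
      have hmemb2 : (n2, q2.2) ∈ pvBucket dday ss := by
        rw [mem_bucket]
        exact ⟨(n2, sch2), h2, q2, hq2m, hq2d, rfl⟩
      have hcount : (((pvBucket dday ss).filter (fun e => decide (pvHit n1 q1.2 e))).map Prod.fst).count n2
          = if decide (pvHit n1 q1.2 (n2, q2.2)) then 1 else 0 := by
        rw [List.count_eq_countP, List.countP_map, List.countP_filter]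
        exact countP_key_unique _ (fun e => decide (pvHit n1 q1.2 e)) n2 q2.2 hbnd hmemb2
      simp only [pvContrib, hfind, Option.map_some, pvG, hf1, hf2, hcount]
      split_ifs <;> simp_all

lemma total_eq_countP (s1l : List (String × Int × Int)) (s2 : PySem.Dict String (Int × Int))
    (hnd : (s1l.map Prod.fst).Nodup) :
    pyGetTotalOverlap (PySem.Dict.mk s1l) s2 =
      (s1l.countP (fun p => s2.contains p.1 && pyAreTimesOverlap p.2 (s2.getD p.1 (0, 0))) : Int) := by
  unfold pyGetTotalOverlap
  have hk : (PySem.Dict.mk s1l).keys = s1l.map Prod.fst := by simp [PySem.Dict.keys]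
  rw [hk]
  have hfun : (fun (total : Int) (day : String) =>
      if s2.contains day then
        if pyAreTimesOverlap ((PySem.Dict.mk s1l).getD day (0, 0)) (s2.getD day (0, 0))
        then total + 1 else total
      else total)
      = (fun total day =>
        if s2.contains day && pyAreTimesOverlap ((PySem.Dict.mk s1l).getD day (0, 0)) (s2.getD day (0, 0))
        then total + 1 else total) := by
    funext t day
    by_cases h1 : s2.contains day = true
    · by_cases h2 : pyAreTimesOverlap ((PySem.Dict.mk s1l).getD day (0, 0)) (s2.getD day (0, 0)) = true
      · simp [h1, h2]
      · simp [h1, h2]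
    · simp [h1]
  rw [hfun, PySem.List.foldl_if_add_one, List.countP_map, zero_add]
  congr 1
  apply List.countP_congr
  intro p hp
  have hg : (PySem.Dict.mk s1l).getD p.1 (0, 0) = p.2 := by
    apply PySem.Dict.getD_of_mem_items
    · show (p.1, p.2) ∈ s1l
      simpa using hp
    · rw [hk]; exact hnd
  simp [Function.comp, hg]

lemma countP_nodup_sub (D K : List String) (hD : D.Nodup) (hK : K.Nodup)
    (hsub : ∀ d ∈ K, d ∈ D) (g : String → Bool) (himp : ∀ d, g d = true → d ∈ K) :
    D.countP g = K.countP g := by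
  rw [List.countP_eq_length_filter, List.countP_eq_length_filter]
  refine List.Perm.length_eq ?_
  apply List.perm_of_nodup_nodup_toFinset_eq (hD.filter _) (hK.filter _)
  ext d
  simp only [List.mem_toFinset, List.mem_filter]
  constructor
  · rintro ⟨_, hg⟩
    exact ⟨himp d hg, hg⟩
  · rintro ⟨hk, hg⟩
    exact ⟨hsub d hk, hg⟩

lemma g_sum_eq_total (n1 n2 : String) (sch1 sch2 : List (String × Int × Int)) (D : List String)
    (hD : D.Nodup) (h1nd : (sch1.map Prod.fst).Nodup)
    (hsub : ∀ d ∈ sch1.map Prod.fst, d ∈ D) (hne : n2 ≠ n1) :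
    (D.map (fun d => if pvG n1 n2 sch1 sch2 d = true then (1 : Int) else 0)).sum
    = pyGetTotalOverlap (PySem.Dict.mk sch1) (PySem.Dict.mk sch2) := by
  rw [total_eq_countP sch1 _ h1nd, PySem.List.sum_map_ite_one_zero]
  congr 1
  have hstep1 : D.countP (pvG n1 n2 sch1 sch2) = (sch1.map Prod.fst).countP (pvG n1 n2 sch1 sch2) := by
    apply countP_nodup_sub D _ hD (h1nd) hsub
    intro d hg
    unfold pvG at hg
    cases hf1 : sch1.find? (fun q => q.1 == d) with
    | none => rw [hf1] at hg; cases hf2 : sch2.find? (fun q => q.1 == d) <;> rw [hf2] at hg <;> simp at hg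
    | some q1 =>
      have hm := List.mem_of_find?_eq_some hf1
      have hd : q1.1 = d := by simpa using List.find?_some hf1
      exact hd ▸ List.mem_map_of_mem (f := Prod.fst) hm
  rw [hstep1, List.countP_map]
  apply List.countP_congr
  intro p hp
  have hfp : sch1.find? (fun q => q.1 == p.1) = some p :=
    find?_of_mem_nodup sch1 p.1 p.2 h1nd (by simpa using hp)
  have hbool : pvG n1 n2 sch1 sch2 p.1
      = ((PySem.Dict.mk sch2).contains p.1 && pyAreTimesOverlap p.2 ((PySem.Dict.mk sch2).getD p.1 (0, 0))) := by
    unfold pvG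
    rw [hfp]
    cases hf2 : sch2.find? (fun q => q.1 == p.1) with
    | none =>
      have hget : (PySem.Dict.mk sch2).get? p.1 = none := by rw [get?_mk_find, hf2]; rfl
      have hcon : (PySem.Dict.mk sch2).contains p.1 = false := by
        rw [PySem.Dict.contains_eq_isSome_get?, hget]; rfl
      simp [hcon]
    | some q2 =>
      have hget : (PySem.Dict.mk sch2).get? p.1 = some q2.2 := by rw [get?_mk_find, hf2]; rfl
      have hcon : (PySem.Dict.mk sch2).contains p.1 = true := by
        rw [PySem.Dict.contains_eq_isSome_get?, hget]; rfl
      have hgd : (PySem.Dict.mk sch2).getD p.1 (0, 0) = q2.2 :=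
        PySem.Dict.getD_of_get?_eq_some (PySem.Dict.mk sch2) (d0 := (0, 0)) hget
      rw [hcon, hgd]
      rw [Bool.eq_iff_iff]
      simp [pvHit, pyAreTimesOverlap, hne]
  simp only [Function.comp_apply, hbool]

lemma emit_items (keys : List String) (C : String → Prop) [DecidablePred C]
    (n1 : String) (F : String → Int) (hnd : keys.Nodup) :
    (keys.foldl (fun acc n2 => if C n2 then acc.insert (n1 ++ "-" ++ n2) (F n2) else acc)
      PySem.Dict.empty).items
    = (keys.filter (fun n2 => decide (C n2))).map (fun n2 => (n1 ++ "-" ++ n2, F n2)) := by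
  rw [PySem.List.foldl_ite_eq_foldl_filter]
  have hinj : Function.Injective (fun s => n1 ++ "-" ++ s) := by
    intro a b h
    exact (String.append_right_inj (n1 ++ "-")).mp h
  have := PySem.Dict.items_foldl_insert_fresh
    (l := keys.filter (fun n2 => decide (C n2))) (k := fun s => n1 ++ "-" ++ s) (v := F)
    (d := PySem.Dict.empty)
    (by intro a _; exact PySem.Dict.contains_empty _)
    ((hnd.filter _).map hinj)
  simpa using this

theorem ports_eq (n1 : String) (ss : List (String × List (String × Int × Int)))
    (hmem : ss = [] ∨ n1 ∈ ss.map Prod.fst)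
    (hndo : (ss.map Prod.fst).Nodup)
    (hndi : ∀ p ∈ ss, (p.2.map Prod.fst).Nodup) :
    get_total_overlap_employees n1 ss = get_total_overlap_employees_alt n1 ss := by
  rcases hmem with rfl | hmm
  · rfl
  · obtain ⟨p1, hp1, hp1fst⟩ := List.mem_map.mp hmm
    have hkeys : (PySem.Dict.mk ss).keys = ss.map Prod.fst := by simp [PySem.Dict.keys]
    have hp1' : (n1, p1.2) ∈ ss := by rw [← hp1fst]; exact hp1
    have hs1nd : (p1.2.map Prod.fst).Nodup := hndi p1 hp1
    have hgls1 : (PySem.Dict.mk ss).getD n1 [] = p1.2 :=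
      PySem.Dict.getD_of_mem_items _ hp1' (by rw [hkeys]; exact hndo) _
    unfold get_total_overlap_employees get_total_overlap_employees_alt
    dsimp only
    rw [byday_eq_flat_fold]
    set bd := (pvFlat ss).foldl (fun idx r => idx.modify r.1 [] (· ++ [r.2])) PySem.Dict.empty with hbddef
    have hbkeys : bd.keys = PySem.Set.ofList ((pvFlat ss).map Prod.fst) := by
      rw [hbddef, PySem.Dict.keys_foldl_modify_key, PySem.Dict.keys_empty, PySem.Set.update_nil_left]
    have hbnodup : bd.keys.Nodup := by
      rw [hbkeys]; exact PySem.Set.nodup_ofList _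
    have hbget : ∀ d, bd.getD d [] = pvBucket d ss := by
      intro d
      rw [hbddef, PySem.Dict.getD_foldl_modify_append, PySem.Dict.getD_empty, List.nil_append,
        bucket_eq_filter_flat]
    have hvals : bd.values = (PySem.Set.ofList ((pvFlat ss).map Prod.fst)).map (fun d => pvBucket d ss) := by
      rw [PySem.Dict.values_eq_map_keys bd hbnodup [], hbkeys]
      exact List.map_congr_left (fun d _ => hbget d)
    rw [hvals, hgls1]
    set DK := PySem.Set.ofList ((pvFlat ss).map Prod.fst) with hDK
    have hDKnodup : DK.Nodup := by rw [hDK]; exact PySem.Set.nodup_ofList _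
    have hsub : ∀ d ∈ p1.2.map Prod.fst, d ∈ DK := by
      intro d hd
      obtain ⟨r, hr, hrfst⟩ := List.mem_map.mp hd
      rw [hDK, PySem.Set.mem_ofList]
      refine List.mem_map.mpr ⟨(d, (n1, r.2)), ?_, rfl⟩
      rw [pvFlat]
      refine List.mem_flatMap.mpr ⟨(n1, p1.2), hp1', ?_⟩
      exact List.mem_map.mpr ⟨r, hr, by rw [hrfst]⟩
    set cnts : PySem.Dict String Int := ((DK.map (fun d => pvBucket d ss)).foldl (fun counts entries =>
      match (entries.find? (fun e => e.1 == n1)).map (fun e => e.2) with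
      | none => counts
      | some t1 =>
        entries.foldl (fun counts e =>
          if e.1 ≠ n1 ∧ ((t1.1 ≤ e.2.1 ∧ e.2.1 < t1.2) ∨ (e.2.1 ≤ t1.1 ∧ t1.1 < e.2.2))
          then counts.insert e.1 (counts.getD e.1 0 + 1) else counts) counts) PySem.Dict.empty) with hcnts
    have hFG : ∀ n2 ∈ ss.map Prod.fst, n2 ≠ n1 →
        cnts.getD n2 0 = pyGetTotalOverlap (PySem.Dict.mk p1.2) (PySem.Dict.mk ((PySem.Dict.mk ss).getD n2 [])) := by
      intro n2 hm hne
      obtain ⟨q, hq, hq1⟩ := List.mem_map.mp hm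
      have hv : (n2, q.2) ∈ ss := by rw [← hq1]; exact hq
      have hget2 : (PySem.Dict.mk ss).getD n2 [] = q.2 :=
        PySem.Dict.getD_of_mem_items _ hv (by rw [hkeys]; exact hndo) _
      rw [hget2, hcnts, counts_getD, PySem.Dict.getD_empty, List.map_map]
      have hcongr : DK.map (pvContrib n1 n2 ∘ fun d => pvBucket d ss)
          = DK.map (fun d => if pvG n1 n2 p1.2 q.2 d = true then (1 : Int) else 0) :=
        List.map_congr_left (fun d _ => contrib_bucket ss n1 p1.2 n2 q.2 d hndo hndi hp1' hv)
      rw [hcongr, g_sum_eq_total n1 n2 p1.2 q.2 DK hDKnodup hs1nd hsub hne, zero_add]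
    have hAfun : (fun (acc : PySem.Dict String Int) (n2 : String) =>
        if n1 ≠ n2 then
          if pyGetTotalOverlap (PySem.Dict.mk p1.2) (PySem.Dict.mk ((PySem.Dict.mk ss).getD n2 [])) ≠ 0
          then acc.insert (n1 ++ "-" ++ n2) (pyGetTotalOverlap (PySem.Dict.mk p1.2) (PySem.Dict.mk ((PySem.Dict.mk ss).getD n2 []))) else acc
        else acc)
        = (fun acc n2 =>
          if n1 ≠ n2 ∧ pyGetTotalOverlap (PySem.Dict.mk p1.2) (PySem.Dict.mk ((PySem.Dict.mk ss).getD n2 [])) ≠ 0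
          then acc.insert (n1 ++ "-" ++ n2) (pyGetTotalOverlap (PySem.Dict.mk p1.2) (PySem.Dict.mk ((PySem.Dict.mk ss).getD n2 []))) else acc) := by
      funext acc n2
      by_cases h1 : n1 ≠ n2
      · by_cases h2 : pyGetTotalOverlap (PySem.Dict.mk p1.2) (PySem.Dict.mk ((PySem.Dict.mk ss).getD n2 [])) ≠ 0
        · rw [if_pos h1, if_pos h2, if_pos ⟨h1, h2⟩]
        · rw [if_pos h1, if_neg h2, if_neg (fun h => h2 h.2)]
      · rw [if_neg h1, if_neg (fun h => h1 h.1)]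
    have hemitB : ss.foldl (fun res p =>
        if p.1 ≠ n1 ∧ cnts.getD p.1 0 ≠ 0
        then res.insert (n1 ++ "-" ++ p.1) (cnts.getD p.1 0) else res) PySem.Dict.empty
        = (ss.map Prod.fst).foldl (fun res x =>
        if x ≠ n1 ∧ cnts.getD x 0 ≠ 0
        then res.insert (n1 ++ "-" ++ x) (cnts.getD x 0) else res) PySem.Dict.empty :=
      by rw [List.foldl_map]
    rw [hkeys, hAfun, hemitB,
      emit_items (ss.map Prod.fst)
        (fun n2 => n1 ≠ n2 ∧ pyGetTotalOverlap (PySem.Dict.mk p1.2) (PySem.Dict.mk ((PySem.Dict.mk ss).getD n2 [])) ≠ 0) n1 _ hndo,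
      emit_items (ss.map Prod.fst) (fun n2 => n2 ≠ n1 ∧ cnts.getD n2 0 ≠ 0) n1 _ hndo]
    have hfil : (ss.map Prod.fst).filter
          (fun n2 => decide (n1 ≠ n2 ∧ pyGetTotalOverlap (PySem.Dict.mk p1.2) (PySem.Dict.mk ((PySem.Dict.mk ss).getD n2 [])) ≠ 0))
        = (ss.map Prod.fst).filter (fun n2 => decide (n2 ≠ n1 ∧ cnts.getD n2 0 ≠ 0)) := by
      apply List.filter_congr
      intro n2 hm
      by_cases hne : n2 = n1
      · subst hne; simp
      · rw [hFG n2 hm hne]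
        simp [hne, Ne.symm hne]
    rw [hfil]
    apply List.map_congr_left
    intro n2 hmf
    obtain ⟨hm, hcond⟩ := List.mem_filter.mp hmf
    have hne : n2 ≠ n1 := by
      simp only [decide_eq_true_eq] at hcond
      exact hcond.1
    rw [hFG n2 hm hne]

-- ===== VERDICT (by name: the statement is the Claim_ definition above) =====
theorem get_total_overlap_employees_spec : Claim_equal_get_total_overlap_employees := by
  intro n1 ss _ hpre
  unfold Spec_get_total_overlap_employees
  exact ports_eq n1 ss hpre.1 hpre.2.1 hpre.2.2
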